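-- pv_equiv track=rewrite | github.com/Pushingcapital/business-knowledge-repo | business_repo_knowledge/scripts/utilities/business_repo_organization.py | generate_file_summary
-- ===== SOURCE A (Python) =====
-- from typing import Dict, List, Any
--
-- def generate_file_summary(moved_files: List[Dict]) -> str:
--     """Generate file organization summary"""
--     summary = "| Category | Files Organized | Key Files |\n"
--     summary += "|----------|-----------------|----------|\n"
--
--     category_counts = {}
--     category_examples = {}
--
--     for file_info in moved_files:
--         category = file_info['category']
--         file_name = file_info['file']
--
--         if category not in category_counts:
--             category_counts[category] = 0
--             category_examples[category] = []
--
--         category_counts[category] += 1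
--         if len(category_examples[category]) < 3:
--             category_examples[category].append(file_name)
--
--     for category in sorted(category_counts.keys()):
--         count = category_counts[category]
--         examples = ", ".join(category_examples[category])
--         summary += f"| {category.title()} | {count} | {examples} |\n"
--
--     return summary
-- ===== SOURCE B (Python) =====
-- def generate_file_summary(moved_files):
--     """Generate file organization summary (stateless rewrite: no grouping dicts;
--     sorted set of categories, then a rescan of moved_files per category)."""
--     header = ("| Category | Files Organized | Key Files |\n"
--               "|----------|-----------------|----------|\n")
--     rows = []
--     for category in sorted({fi["category"] for fi in moved_files}):
--         names = [fi["file"] for fi in moved_files if fi["category"] == category]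
--         rows.append(f"| {category.title()} | {len(names)} | {', '.join(names[:3])} |\n")
--     return header + "".join(rows)
-- ===== Notes on version B (the rewrite author's own statement) =====
-- stated objective: simpler
-- what changed: B maintains no per-category state at all: instead of A's single pass building two parallel dicts (running counts and example lists capped at 3), it takes the sorted set of categories and, for each category, rescans moved_files with a comprehension to collect that category's file names, deriving the count (len) and the first-3 examples ([:3]) from that list.
import Mathlib
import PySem

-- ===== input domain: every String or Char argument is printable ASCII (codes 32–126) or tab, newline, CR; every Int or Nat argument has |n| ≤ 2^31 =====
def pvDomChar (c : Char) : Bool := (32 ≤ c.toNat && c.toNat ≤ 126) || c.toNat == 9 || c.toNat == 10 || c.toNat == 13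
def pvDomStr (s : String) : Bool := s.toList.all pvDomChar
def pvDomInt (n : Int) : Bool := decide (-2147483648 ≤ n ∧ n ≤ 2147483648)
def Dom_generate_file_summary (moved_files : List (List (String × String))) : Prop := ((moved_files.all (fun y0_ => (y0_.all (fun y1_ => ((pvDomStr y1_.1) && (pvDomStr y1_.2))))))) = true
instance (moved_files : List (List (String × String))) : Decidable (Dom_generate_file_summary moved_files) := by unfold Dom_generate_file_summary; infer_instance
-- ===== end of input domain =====

-- B keeps no per-category state (no dicts): it sorts the SET of categories and, per category,
-- rescans moved_files for that category's file names, deriving count and first-3 examples there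
-- (objective: simpler; not faster).

-- ===== PORT A =====
-- shared helper: str.title() — exact on Dom (ASCII), where a char is cased iff it is alphabetic
def pvTitleChars : Bool → List Char → List Char
  | _, [] => []
  | prev, c :: cs =>
    if PySem.Chars.isalpha c then
      (if prev then PySem.Chars.lowerChar c else PySem.Chars.upperChar c) :: pvTitleChars true cs
    else c :: pvTitleChars false cs

def pvTitle (s : String) : String := String.ofList (pvTitleChars false s.toList)

-- body of A's first for-loop; file_info[k] on a present key is ported as getD
-- (a record missing 'category'/'file' — Python's KeyError — is excluded by Pre_)
def pvStepA (st : PySem.Dict String Int × PySem.Dict String (List String))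
    (fi : List (String × String)) :
    PySem.Dict String Int × PySem.Dict String (List String) :=
  let category := (fi.lookup "category").getD ""
  let fname := (fi.lookup "file").getD ""
  let counts := if st.1.contains category then st.1 else st.1.insert category 0
  let examples := if st.1.contains category then st.2 else st.2.insert category ([] : List String)
  let counts := counts.insert category (counts.getD category 0 + 1)
  let ex := examples.getD category []
  let examples := if ex.length < 3 then examples.insert category (ex ++ [fname]) else examples
  (counts, examples)

-- one markdown row of A's second loop (the f-string)
def pvRowA (st : PySem.Dict String Int × PySem.Dict String (List String)) (category : String) : String :=
  "| " ++ pvTitle category ++ " | " ++ PySem.Int.toStr (st.1.getD category 0) ++ " | "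
    ++ PySem.Str.join ", " (st.2.getD category []) ++ " |\n"

def generate_file_summary (moved_files : List (List (String × String))) : String :=
  let st := moved_files.foldl pvStepA (PySem.Dict.mk [], PySem.Dict.mk [])
  (PySem.List.sorted st.1.keys (fun k => k) false).foldl
    (fun summary category => summary ++ pvRowA st category)
    ("| Category | Files Organized | Key Files |\n" ++ "|----------|-----------------|----------|\n")

-- ===== PORT B =====
-- fi["category"] / fi["file"] (present under Pre_)
def pvCatOf (fi : List (String × String)) : String := (fi.lookup "category").getD ""
def pvFileOf (fi : List (String × String)) : String := (fi.lookup "file").getD ""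

-- the f-string appended by B's loop body: names is the per-category rescan comprehension
def pvRowB (moved_files : List (List (String × String))) (category : String) : String :=
  let names := (moved_files.filter (fun fi => pvCatOf fi == category)).map pvFileOf
  "| " ++ pvTitle category ++ " | " ++ PySem.Int.toStr (names.length : Int) ++ " | "
    ++ PySem.Str.join ", " (PySem.List.slice names none (some 3)) ++ " |\n"

def generate_file_summary_alt (moved_files : List (List (String × String))) : String :=
  "| Category | Files Organized | Key Files |\n|----------|-----------------|----------|\n"
    ++ PySem.Str.join ""
        ((PySem.List.sorted (PySem.Set.ofList (moved_files.map pvCatOf)) (fun k => k) false).map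
          (pvRowB moved_files))

-- ===== PRECONDITION & SPEC =====
-- Pre_ excludes exactly the inputs where Python A raises KeyError: a record missing the
-- 'category' or 'file' key (B raises there too).
def Pre_generate_file_summary (moved_files : List (List (String × String))) : Prop :=
  ∀ fi ∈ moved_files, "category" ∈ fi.map Prod.fst ∧ "file" ∈ fi.map Prod.fst
instance (moved_files : List (List (String × String))) : Decidable (Pre_generate_file_summary moved_files) := by unfold Pre_generate_file_summary; infer_instance

def pvWitness_generate_file_summary : (List (List (String × String))) :=
  [[("category", "docs"), ("file", "readme.md")], [("category", "docs"), ("file", "intro.md")]]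

def Spec_generate_file_summary (moved_files : List (List (String × String))) (out : String) : Prop := out = generate_file_summary_alt moved_files
instance (moved_files : List (List (String × String))) (out : String) : Decidable (Spec_generate_file_summary moved_files out) := by unfold Spec_generate_file_summary; infer_instance

-- ===== CLAIM (what is proved, stated in full; the proofs are below) =====
def Claim_equal_generate_file_summary : Prop := ∀ (moved_files : List (List (String × String))), Dom_generate_file_summary moved_files → Pre_generate_file_summary moved_files → Spec_generate_file_summary moved_files (generate_file_summary moved_files)

-- ===== LEMMAS AND PROOFS =====

-- proof-only model of A's grouping: ONE dict of all file names per category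
def pvStepB (g : PySem.Dict String (List String)) (fi : List (String × String)) :
    PySem.Dict String (List String) :=
  g.modify ((fi.lookup "category").getD "") [] (fun l => l ++ [(fi.lookup "file").getD ""])

-- A's two dicts are the model dict with the values mapped: by length resp. by take 3
def pvMapVal {α : Type} (f : List String → α) (g : PySem.Dict String (List String)) :
    PySem.Dict String α :=
  PySem.Dict.mk (g.items.map (fun p => (p.1, f p.2)))

theorem pv_contains_mapVal {α : Type} (f : List String → α) (g : PySem.Dict String (List String))
    (k : String) : (pvMapVal f g).contains k = g.contains k := by
  simp only [pvMapVal, PySem.Dict.contains, List.any_map]; rfl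

theorem pv_get?_mapVal {α : Type} (f : List String → α) (g : PySem.Dict String (List String))
    (k : String) : (pvMapVal f g).get? k = (g.get? k).map f := by
  simp only [pvMapVal, PySem.Dict.get?, List.find?_map]
  have h1 : ((fun (p : String × α) => p.1 == k) ∘ fun (p : String × List String) => (p.1, f p.2))
      = (fun p => p.1 == k) := rfl
  rw [h1]
  cases List.find? (fun p => p.1 == k) g.items <;> rfl

theorem pv_keys_mapVal {α : Type} (f : List String → α) (g : PySem.Dict String (List String)) :
    (pvMapVal f g).keys = g.keys := by
  simp [pvMapVal, PySem.Dict.keys, List.map_map, Function.comp]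

theorem pv_get?_eq_none (g : PySem.Dict String (List String)) (k : String)
    (h : g.contains k = false) : g.get? k = none := by
  rw [← Option.not_isSome_iff_eq_none, ← PySem.Dict.contains_eq_isSome_get?, h]; simp

theorem pv_find?_unique {k : String} {q : String × List String} :
    ∀ {l : List (String × List String)}, (l.map Prod.fst).Nodup →
      l.find? (fun p => p.1 == k) = some q → ∀ p ∈ l, p.1 = k → p = q := by
  intro l
  induction l with
  | nil => intro _ _ p hp; simp at hp
  | cons a t ih =>
    intro hnd hf p hp hpk
    simp only [List.map_cons, List.nodup_cons] at hnd
    rcases List.mem_cons.mp hp with rfl | hpt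
    · rw [List.find?_cons_of_pos (by simp [hpk])] at hf
      exact Option.some.inj hf
    · by_cases hak : a.1 = k
      · exact absurd (hpk ▸ (List.mem_map.mpr ⟨p, hpt, rfl⟩)) (hak ▸ hnd.1)
      · rw [List.find?_cons_of_neg (by simp [hak])] at hf
        exact ih hnd.2 hf p hpt hpk

theorem pv_insert_mapVal {α : Type} (f : List String → α) (g : PySem.Dict String (List String))
    (cat : String) (v : α) (w : List String) (hc : g.contains cat = true) (hv : v = f w) :
    (pvMapVal f g).insert cat v = pvMapVal f (g.insert cat w) := by
  unfold PySem.Dict.insert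
  rw [pv_contains_mapVal, hc]
  simp only [if_pos, pvMapVal, List.map_map]
  congr 1
  apply List.map_congr_left
  intro p _
  by_cases hp : (p.1 == cat) = true <;> simp [hp, Function.comp, hv]

theorem pv_insert_mapVal_skip {α : Type} (f : List String → α) (g : PySem.Dict String (List String))
    (cat : String) (w : List String) (hc : g.contains cat = true)
    (hw : ∀ p ∈ g.items, p.1 = cat → f p.2 = f w) :
    pvMapVal f g = pvMapVal f (g.insert cat w) := by
  unfold PySem.Dict.insert
  rw [hc]
  simp only [if_pos, pvMapVal, List.map_map]
  congr 1
  apply List.map_congr_left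
  intro p hp
  by_cases hpc : (p.1 == cat) = true
  · have h1 : p.1 = cat := by simpa using hpc
    simp [Function.comp, ← hw p hp h1, h1]
  · simp [Function.comp, hpc]

theorem pv_insert2_mapVal {α : Type} (f : List String → α) (g : PySem.Dict String (List String))
    (cat : String) (v0 v : α) (w : List String) (hc : g.contains cat = false) (hv : v = f w) :
    ((pvMapVal f g).insert cat v0).insert cat v = pvMapVal f (g.insert cat w) := by
  have hcF : (pvMapVal f g).contains cat = false := by rw [pv_contains_mapVal]; exact hc
  have hnc : ∀ p ∈ g.items, (p.1 == cat) = false := by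
    intro p hp
    by_contra hb
    have hmem : g.items.any (fun p => p.1 == cat) = true :=
      List.any_eq_true.mpr ⟨p, hp, by simpa using hb⟩
    rw [show g.items.any (fun p => p.1 == cat) = g.contains cat from rfl, hc] at hmem
    exact Bool.false_ne_true hmem
  unfold PySem.Dict.insert
  rw [hcF]
  simp only [if_neg, Bool.false_eq_true, not_false_iff]
  have hcT : (PySem.Dict.mk ((pvMapVal f g).items ++ [(cat, v0)])).contains cat = true := by
    simp [PySem.Dict.contains]
  rw [hc]
  simp only [Bool.false_eq_true, reduceIte, hcT, if_pos]
  simp only [pvMapVal, List.map_append, List.map_map, List.map_cons, List.map_nil,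
    beq_self_eq_true, if_pos, hv]
  congr 1
  refine congrArg (fun l => l ++ [(cat, f w)]) ?_
  apply List.map_congr_left
  intro p hp
  simp [Function.comp, hnc p hp]

theorem pv_nodup_insert (g : PySem.Dict String (List String)) (k : String) (v : List String)
    (h : (g.items.map Prod.fst).Nodup) : ((g.insert k v).items.map Prod.fst).Nodup := by
  unfold PySem.Dict.insert
  by_cases hc : g.contains k = true
  · rw [hc]
    simp only [if_pos, List.map_map]
    have he : ∀ p ∈ g.items,
        (Prod.fst ∘ fun (p : String × List String) => if p.1 == k then (k, v) else p) p
          = Prod.fst p := by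
      intro p _
      by_cases hpk : p.1 = k
      · simp [hpk]
      · simp [hpk]
    rw [List.map_congr_left he]
    exact h
  · have hc' : g.contains k = false := by simpa using hc
    rw [hc']
    simp only [Bool.false_eq_true, reduceIte, List.map_append, List.map_cons, List.map_nil]
    refine List.Nodup.append h (List.nodup_singleton _) ?_
    intro x hx hy
    simp only [List.mem_singleton] at hy
    rcases List.mem_map.mp hx with ⟨p, hp, rfl⟩
    have hmem : g.items.any (fun q => q.1 == k) = true :=
      List.any_eq_true.mpr ⟨p, hp, by simp [hy]⟩
    rw [show g.items.any (fun q => q.1 == k) = g.contains k from rfl, hc'] at hmem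
    exact Bool.false_ne_true hmem

theorem pv_nodup_stepB (g : PySem.Dict String (List String)) (fi : List (String × String))
    (h : (g.items.map Prod.fst).Nodup) : ((pvStepB g fi).items.map Prod.fst).Nodup := by
  unfold pvStepB PySem.Dict.modify
  exact pv_nodup_insert g _ _ h

-- one step of A's loop, under the mapped-dict correspondence with the model dict
theorem pv_step_comm (g : PySem.Dict String (List String)) (fi : List (String × String))
    (h : (g.items.map Prod.fst).Nodup) :
    pvStepA (pvMapVal (fun l => (l.length : Int)) g, pvMapVal (fun l => l.take 3) g) fi
      = (pvMapVal (fun l => (l.length : Int)) (pvStepB g fi),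
         pvMapVal (fun l => l.take 3) (pvStepB g fi)) := by
  unfold pvStepA pvStepB
  set cat := (fi.lookup "category").getD "" with hcat
  set fname := (fi.lookup "file").getD "" with hfname
  simp only [pv_contains_mapVal]
  by_cases hc : g.contains cat = true
  · simp only [hc, if_pos]
    obtain ⟨gl, hgl⟩ : ∃ gl, g.get? cat = some gl := by
      have := PySem.Dict.contains_eq_isSome_get? g cat
      rw [hc] at this
      exact Option.isSome_iff_exists.mp this.symm
    simp only [PySem.Dict.getD, PySem.Dict.modify, pv_get?_mapVal, hgl, Option.map_some,
      Option.getD_some]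
    by_cases hlen : gl.length < 3
    · rw [if_pos (by simp [List.length_take]; omega)]
      have h1 : List.take 3 gl = gl := List.take_of_length_le (by omega)
      have h2 : List.take 3 (gl ++ [fname]) = gl ++ [fname] :=
        List.take_of_length_le (by simp; omega)
      refine Prod.ext ?_ ?_
      · exact pv_insert_mapVal _ g cat _ _ hc (by simp)
      · exact pv_insert_mapVal _ g cat _ _ hc (by rw [h1, h2])
    · rw [if_neg (by simp [List.length_take]; omega)]
      refine Prod.ext ?_ ?_
      · exact pv_insert_mapVal _ g cat _ _ hc (by simp)
      · refine pv_insert_mapVal_skip _ g cat _ hc ?_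
        intro p hp hpk
        obtain ⟨q, hq, hq2⟩ : ∃ q, g.items.find? (fun p => p.1 == cat) = some q ∧ q.2 = gl := by
          unfold PySem.Dict.get? at hgl
          cases hfq : g.items.find? (fun p => p.1 == cat) with
          | none => rw [hfq] at hgl; simp at hgl
          | some q => rw [hfq] at hgl; exact ⟨q, rfl, by simpa using hgl⟩
        have hpq := pv_find?_unique h hq p hp hpk
        rw [hpq, hq2, List.take_append_of_le_length (by omega)]
  · have hc' : g.contains cat = false := by simpa using hc
    simp only [hc', Bool.false_eq_true, reduceIte]
    simp only [PySem.Dict.getD, PySem.Dict.get?_insert_self, Option.getD_some,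
      PySem.Dict.modify, pv_get?_eq_none g cat hc', Option.getD_none]
    rw [if_pos (by simp)]
    refine Prod.ext ?_ ?_
    · exact pv_insert2_mapVal _ g cat _ _ _ hc' (by simp)
    · exact pv_insert2_mapVal _ g cat _ _ _ hc' (by simp)

theorem pv_loop_comm : ∀ (mf : List (List (String × String))) (g : PySem.Dict String (List String)),
    (g.items.map Prod.fst).Nodup →
    mf.foldl pvStepA (pvMapVal (fun l => (l.length : Int)) g, pvMapVal (fun l => l.take 3) g)
      = (pvMapVal (fun l => (l.length : Int)) (mf.foldl pvStepB g),
         pvMapVal (fun l => l.take 3) (mf.foldl pvStepB g)) := by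
  intro mf
  induction mf with
  | nil => intro g _; simp
  | cons fi t ih =>
    intro g h
    simp only [List.foldl_cons, pv_step_comm g fi h]
    exact ih (pvStepB g fi) (pv_nodup_stepB g fi h)

theorem pv_loop_comm0 (mf : List (List (String × String))) :
    mf.foldl pvStepA (PySem.Dict.mk [], PySem.Dict.mk [])
      = (pvMapVal (fun l => (l.length : Int)) (mf.foldl pvStepB (PySem.Dict.mk [])),
         pvMapVal (fun l => l.take 3) (mf.foldl pvStepB (PySem.Dict.mk []))) :=
  pv_loop_comm mf (PySem.Dict.mk []) (by simp)

-- the model dict is the grouping foldl over the (category, file) pairs of the input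
theorem pv_groups_as_pairs (mf : List (List (String × String))) :
    mf.foldl pvStepB (PySem.Dict.mk [])
      = (mf.map (fun fi => (pvCatOf fi, pvFileOf fi))).foldl
          (fun d p => d.modify p.1 [] (fun l => l ++ [p.2])) (PySem.Dict.mk []) := by
  rw [List.foldl_map]; rfl

-- the model dict's keys are exactly B's set(categories) (first occurrences, in order)
theorem pv_keys_groups (mf : List (List (String × String))) :
    (mf.foldl pvStepB (PySem.Dict.mk [])).keys = PySem.Set.ofList (mf.map pvCatOf) := by
  have h : mf.foldl pvStepB (PySem.Dict.mk [])
      = mf.foldl (fun d fi => d.modify (pvCatOf fi) []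
          ((fun (_ : PySem.Dict String (List String)) fi l => l ++ [pvFileOf fi]) d fi))
          (PySem.Dict.mk []) := rfl
  rw [h, PySem.Dict.keys_foldl_modify_key, PySem.Set.ofList_eq_foldl]
  rfl

-- the model dict's entry at any category is B's rescan comprehension for that category
theorem pv_getD_groups (mf : List (List (String × String))) (c : String) :
    (mf.foldl pvStepB (PySem.Dict.mk [])).getD c []
      = (mf.filter (fun fi => pvCatOf fi == c)).map pvFileOf := by
  rw [pv_groups_as_pairs, PySem.Dict.getD_foldl_modify_append]
  have h0 : (PySem.Dict.mk ([] : List (String × List String))).getD c [] = [] := rfl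
  rw [h0, List.nil_append, List.filter_map, List.map_map]
  rfl

theorem pv_getD_mapVal {α : Type} (f : List String → α) (g : PySem.Dict String (List String))
    (c : String) (d : α) (hd : f [] = d) : (pvMapVal f g).getD c d = f (g.getD c []) := by
  simp only [PySem.Dict.getD, pv_get?_mapVal]
  cases g.get? c <;> simp [hd]

-- A's row over the mapped state equals B's rescan row
theorem pv_row_eq (mf : List (List (String × String))) (c : String) :
    pvRowA (mf.foldl pvStepA (PySem.Dict.mk [], PySem.Dict.mk [])) c = pvRowB mf c := by
  unfold pvRowA pvRowB
  dsimp only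
  rw [pv_loop_comm0 mf]
  rw [PySem.List.slice_to _ (by norm_num)]
  rw [pv_getD_mapVal _ _ _ _ (by simp), pv_getD_mapVal _ _ _ _ (by simp), pv_getD_groups]
  rfl

theorem pv_join_empty_cons (x : String) (xs : List String) :
    PySem.Str.join "" (x :: xs) = x ++ PySem.Str.join "" xs := by
  cases xs with
  | nil =>
    simp [PySem.Str.join, PySem.Chars.join, List.intercalate]
  | cons y ys =>
    simp [PySem.Str.join, PySem.Chars.join, List.intercalate]

theorem pv_foldl_append_eq_join (row : String → String) :
    ∀ (l : List String) (init : String),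
      l.foldl (fun s c => s ++ row c) init = init ++ PySem.Str.join "" (l.map row) := by
  intro l
  induction l with
  | nil =>
    intro init
    simp [PySem.Str.join, PySem.Chars.join, List.intercalate]
  | cons a t ih =>
    intro init
    simp only [List.foldl_cons, List.map_cons, ih, pv_join_empty_cons, String.append_assoc]

-- ===== VERDICT (by name: the statement is the Claim_ definition above) =====
theorem generate_file_summary_spec : Claim_equal_generate_file_summary := by
  intro mf _ _
  unfold Spec_generate_file_summary generate_file_summary generate_file_summary_alt
  dsimp only
  have hkeys : (mf.foldl pvStepA (PySem.Dict.mk [], PySem.Dict.mk [])).1.keys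
      = PySem.Set.ofList (mf.map pvCatOf) := by
    rw [pv_loop_comm0 mf, pv_keys_mapVal, pv_keys_groups]
  rw [hkeys, pv_foldl_append_eq_join]
  have hrows : (PySem.List.sorted (PySem.Set.ofList (mf.map pvCatOf)) (fun k => k) false).map
        (pvRowA (mf.foldl pvStepA (PySem.Dict.mk [], PySem.Dict.mk [])))
      = (PySem.List.sorted (PySem.Set.ofList (mf.map pvCatOf)) (fun k => k) false).map
        (pvRowB mf) := List.map_congr_left (fun c _ => pv_row_eq mf c)
  rw [hrows]
  rfl
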